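-- pv_equiv track=rewrite | github.com/pypi-data/pypi-mirror-341 | packages/markprompt/markprompt-0.1.6-py3-none-any.whl/markprompt/core/parser.py | _parse_messages
-- ===== SOURCE A (Python) =====
-- from typing import Dict, List, Optional, Tuple, Any
--
-- def _parse_messages(content: str, roles: Dict[str, str]) -> List[Dict[str, str]]:
--     """解析模板内容为消息列表，不替换变量。"""
--     # 如果没有角色定义，则将所有内容视为系统消息
--     if not roles:
--         return [{"role": "system", "content": content.strip()}]
--
--     case_insensitive_roles = {}
--     for role, prefix in roles.items():
--         role_name = prefix.split('\n')[0]
--         case_insensitive_roles[role_name.lower()] = (role, prefix)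
--
--     messages = []
--     current_pos = 0
--     while current_pos < len(content):
--         role_match = False
--         matched_role = None
--         matched_prefix = None
--
--         is_line_start = current_pos == 0 or content[current_pos - 1] == '\n'
--
--         if not is_line_start:
--             current_pos += 1
--             continue
--
--         for role_name in case_insensitive_roles.keys():
--             if current_pos + len(role_name) <= len(content):
--                 possible_role = content[current_pos:current_pos + len(role_name)]
--
--                 if possible_role.lower() == role_name.lower() and \
--                     current_pos + len(role_name) + 5 <= len(content) and \
--                     content[current_pos + len(role_name):current_pos + len(role_name) + 5] == '\n---\n':
--                     original_role, prefix = case_insensitive_roles[role_name.lower()]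
--                     role_match = True
--                     matched_role = original_role
--                     matched_prefix = possible_role + '\n---\n'
--                     break
--
--         if not role_match:
--             messages.append({"role": "system", "content": content.strip()})
--             break
--
--         start_pos = current_pos + len(matched_prefix)
--         end_pos = len(content)
--
--         for role_name in case_insensitive_roles.keys():
--             remaining = content[start_pos:]
--             search_pos = 0
--             while search_pos < len(remaining):
--                 next_pos = remaining.lower().find(role_name.lower(), search_pos)
--                 if next_pos == -1:
--                     break
--
--                 is_line_start = next_pos == 0 or remaining[next_pos - 1] == '\n'
--
--                 possible_role = remaining[next_pos:next_pos + len(role_name)]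
--                 if is_line_start and next_pos + len(role_name) + 5 <= len(remaining) and \
--                     remaining[next_pos + len(role_name):next_pos + len(role_name) + 5] == '\n---\n' and \
--                     possible_role.lower() == role_name.lower():
--                     absolute_pos = start_pos + next_pos
--                     if absolute_pos < end_pos:
--                         end_pos = absolute_pos
--                     break
--
--                 search_pos = next_pos + 1
--
--         message_content = content[start_pos:end_pos].strip()
--         messages.append({
--             "role": matched_role,
--             "content": message_content
--         })
--
--         current_pos = end_pos
--
--     return messages
-- ===== SOURCE B (Python) =====
-- def _parse_messages(content, roles):
--     """Line-based parse: split once on newline, collect marker lines, then slice messages."""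
--     if not roles:
--         return [{"role": "system", "content": content.strip()}]
--     if not content:
--         return []
--
--     table = {}
--     for role, prefix in roles.items():
--         table[prefix.split('\n')[0].lower()] = role
--
--     lines = content.split('\n')
--     markers = []  # (offset, role, content_start)
--     off = 0
--     allowed = 0   # first offset at which a new marker may begin
--     for i, line in enumerate(lines):
--         role = table.get(line.lower())
--         if role is not None and allowed <= off and i + 2 < len(lines) \
--                 and lines[i + 1] == '---':
--             cstart = off + len(line) + 5
--             markers.append((off, role, cstart))
--             allowed = cstart
--         off += len(line) + 1
--
--     if not markers or markers[0][0] != 0: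
--         return [{"role": "system", "content": content.strip()}]
--
--     out = []
--     for k, (p, role, cstart) in enumerate(markers):
--         cend = markers[k + 1][0] if k + 1 < len(markers) else len(content)
--         out.append({"role": role, "content": content[cstart:cend].strip()})
--     return out
-- ===== Notes on version B (the rewrite author's own statement) =====
-- stated objective: alternative
-- what changed: A walks the content character by character and, after each matched header, rescans the whole remaining text once per role with lowercased str.find to locate the message end; B splits the content on newline exactly once and makes a single pass over the lines, recognising a marker as a line whose lowercase form is a role name followed by a '---' line that is itself newline-terminated, then slices the messages between consecutive markers.
import Mathlib
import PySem

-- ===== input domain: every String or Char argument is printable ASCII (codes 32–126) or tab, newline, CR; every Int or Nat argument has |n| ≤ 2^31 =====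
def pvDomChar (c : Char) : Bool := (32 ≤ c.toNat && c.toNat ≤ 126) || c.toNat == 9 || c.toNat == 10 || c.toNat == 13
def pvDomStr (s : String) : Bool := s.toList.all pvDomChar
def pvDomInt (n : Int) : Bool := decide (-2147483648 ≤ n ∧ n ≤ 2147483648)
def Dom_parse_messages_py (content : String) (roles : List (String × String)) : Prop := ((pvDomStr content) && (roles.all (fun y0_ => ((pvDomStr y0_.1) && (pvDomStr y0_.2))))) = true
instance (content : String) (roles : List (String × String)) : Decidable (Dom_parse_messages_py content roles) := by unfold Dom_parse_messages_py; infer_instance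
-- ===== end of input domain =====

-- B replaces A's character-by-character scan with per-role rescans of the remaining text by one
-- split of the content on '\n' and a single pass over the lines (objective: alternative).

-- ===== PORT A =====
-- literal transliteration of _parse_messages (Source A); loops are fuel recursions with
-- sufficient fuel (each Python loop strictly advances its position)

-- prefix.split('\n')[0] : split with a separator always returns a nonempty list, so [0] is headD
def pmA_roleName (pfx : List Char) : List Char := (PySem.Chars.splitOn pfx ['\n']).headD []

-- case_insensitive_roles = {} ; for role, prefix in roles.items(): case_insensitive_roles[prefix.split('\n')[0].lower()] = (role, prefix)
def pmA_ciRoles (roles : List (String × String)) : PySem.Dict (List Char) (String × String) :=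
  (PySem.Dict.ofList roles).items.foldl
    (fun d rp => d.insert (PySem.Chars.lower (pmA_roleName rp.2.toList)) rp) PySem.Dict.empty

-- the head-match for-loop over case_insensitive_roles.keys() (with break); iterating items
-- is keys()+lookup, since dict keys are unique case_insensitive_roles[role_name.lower()] is rp
def pmA_headMatch (cs : List Char) (pos : Nat) :
    List (List Char × String × String) → Option (String × Nat)
  | [] => none
  | (k, rp) :: rest =>
    if pos + k.length ≤ cs.length then
      if PySem.Chars.lower (PySem.List.slice cs (some (pos : Int)) (some ((pos : Int) + (k.length : Int)))) == PySem.Chars.lower k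
          && decide (pos + k.length + 5 ≤ cs.length)
          && (PySem.List.slice cs (some ((pos : Int) + (k.length : Int))) (some ((pos : Int) + (k.length : Int) + 5)) == ['\n', '-', '-', '-', '\n'])
      then some (rp.1, k.length)
      else pmA_headMatch cs pos rest
    else pmA_headMatch cs pos rest

-- the inner 'while search_pos < len(remaining)' find loop for one role_name
def pmA_searchRole (remaining : List Char) (k : List Char) : Nat → Nat → Option Nat
  | 0, _ => none
  | fuel + 1, searchPos =>
    if searchPos < remaining.length then
      let next := PySem.Chars.findFrom (PySem.Chars.lower remaining) (PySem.Chars.lower k) (searchPos : Int)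
      if next == -1 then none
      else
        let np := next.toNat
        if (np == 0 || (PySem.List.pyGet? remaining ((np : Int) - 1) == some '\n'))
            && decide (np + k.length + 5 ≤ remaining.length)
            && (PySem.List.slice remaining (some ((np : Int) + (k.length : Int))) (some ((np : Int) + (k.length : Int) + 5)) == ['\n', '-', '-', '-', '\n'])
            && (PySem.Chars.lower (PySem.List.slice remaining (some (np : Int)) (some ((np : Int) + (k.length : Int)))) == PySem.Chars.lower k)
        then some np
        else pmA_searchRole remaining k fuel (np + 1)
    else none

-- end_pos = len(content); for role_name in keys(): … if absolute_pos < end_pos: end_pos = absolute_pos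
def pmA_endPos (cs : List Char) (startPos : Nat) (items : List (List Char × String × String)) : Nat :=
  items.foldl
    (fun endPos kv =>
      let remaining := PySem.List.slice cs (some (startPos : Int)) none
      match pmA_searchRole remaining kv.1 (remaining.length + 1) 0 with
      | some np => if startPos + np < endPos then startPos + np else endPos
      | none => endPos)
    cs.length

-- the outer 'while current_pos < len(content)' loop; append-then-break is prepend recursion
def pmA_loop (content : String) (cs : List Char) (items : List (List Char × String × String)) :
    Nat → Nat → List (List (String × String))
  | 0, _ => []
  | fuel + 1, pos =>
    if pos < cs.length then
      if !(pos == 0 || (PySem.List.pyGet? cs ((pos : Int) - 1) == some '\n')) then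
        pmA_loop content cs items fuel (pos + 1)
      else
        match pmA_headMatch cs pos items with
        | none => [[("role", "system"), ("content", PySem.Str.strip content)]]
        | some (role, klen) =>
          let startPos := pos + klen + 5
          let endPos := pmA_endPos cs startPos items
          [("role", role), ("content", String.ofList (PySem.Chars.strip (PySem.List.slice cs (some (startPos : Int)) (some (endPos : Int)))))]
            :: pmA_loop content cs items fuel endPos
    else []

def parse_messages_py (content : String) (roles : List (String × String)) : List (List (String × String)) :=
  if (PySem.Dict.ofList roles).items == [] then
    [[("role", "system"), ("content", PySem.Str.strip content)]]
  else
    pmA_loop content content.toList (pmA_ciRoles roles).items (content.toList.length + 1) 0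

-- ===== PORT B =====
-- literal transliteration of Source B (line-based: one split of the content on '\n',
-- then a single pass over the lines collecting the role markers)

-- table = {} ; for role, prefix in roles.items(): table[prefix.split('\n')[0].lower()] = role
def pmB_table (roles : List (String × String)) : PySem.Dict (List Char) String :=
  (PySem.Dict.ofList roles).items.foldl
    (fun d rp => d.insert (PySem.Chars.lower ((PySem.Chars.splitOn rp.2.toList ['\n']).headD [])) rp.1)
    PySem.Dict.empty

-- for i, line in enumerate(lines): … — the (off, allowed) state threads through; a marker line
-- needs a role name, a following '---' line, and a line after that ('---' is newline-terminated)
def pmB_collect (tbl : PySem.Dict (List Char) String) :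
    List (List Char) → Nat → Nat → List (Nat × String × Nat)
  | [], _, _ => []
  | ln :: rest, off, allowed =>
    match tbl.get? (PySem.Chars.lower ln), rest with
    | some role, l2 :: _ :: _ =>
      if allowed ≤ off ∧ l2 = ['-', '-', '-'] then
        (off, role, off + ln.length + 5) ::
          pmB_collect tbl rest (off + ln.length + 1) (off + ln.length + 5)
      else pmB_collect tbl rest (off + ln.length + 1) allowed
    | _, _ => pmB_collect tbl rest (off + ln.length + 1) allowed

-- for k, (p, role, cstart) in enumerate(markers): cend = markers[k+1][0] if k+1 < len(markers) else n
def pmB_assemble (cs : List Char) : List (Nat × String × Nat) → List (List (String × String))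
  | [] => []
  | (_, role, cstart) :: rest =>
    [("role", role), ("content", String.ofList (PySem.Chars.strip (PySem.List.slice cs (some (cstart : Int)) (some (((match rest with | [] => cs.length | (q, _, _) :: _ => q) : Nat) : Int)))))]
      :: pmB_assemble cs rest

def parse_messages_py_alt (content : String) (roles : List (String × String)) : List (List (String × String)) :=
  if (PySem.Dict.ofList roles).items == ([] : List (String × String)) then
    [[("role", "system"), ("content", PySem.Str.strip content)]]
  else if content.toList == ([] : List Char) then []
  else
    match pmB_collect (pmB_table roles) (PySem.Chars.splitOn content.toList ['\n']) 0 0 with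
    | [] => [[("role", "system"), ("content", PySem.Str.strip content)]]
    | (p, r, c) :: ms =>
      if p ≠ 0 then [[("role", "system"), ("content", PySem.Str.strip content)]]
      else pmB_assemble content.toList ((p, r, c) :: ms)

-- ===== PRECONDITION & SPEC =====
def Spec_parse_messages_py (content : String) (roles : List (String × String)) (out : List (List (String × String))) : Prop := out = parse_messages_py_alt content roles
instance (content : String) (roles : List (String × String)) (out : List (List (String × String))) : Decidable (Spec_parse_messages_py content roles out) := by unfold Spec_parse_messages_py; infer_instance

-- ===== CLAIM (what is proved, stated in full; the proofs are below) =====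
def Claim_equal_parse_messages_py : Prop := ∀ (content : String) (roles : List (String × String)), Dom_parse_messages_py content roles → Spec_parse_messages_py content roles (parse_messages_py content roles)

-- ===== LEMMAS AND PROOFS =====

-- ---- proof-level model of B: a character-position scan over the content; the proof shows
-- A's loop equals assembling this scan (pv_main) and B's line pass equals this scan (pv_bridge)

def pvFindAt (cs : List Char) (pos : Nat) : List (List Char × String) → Option (Nat × String × Nat)
  | [] => none
  | (name, role) :: rest =>
    if decide (pos + name.length + 5 ≤ cs.length)
        && (PySem.Chars.lower (PySem.List.slice cs (some (pos : Int)) (some ((pos : Int) + (name.length : Int)))) == name)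
        && (PySem.List.slice cs (some ((pos : Int) + (name.length : Int))) (some ((pos : Int) + (name.length : Int) + 5)) == ['\n', '-', '-', '-', '\n'])
    then some (pos, role, pos + name.length + 5)
    else pvFindAt cs pos rest

def pvMarkAt (cs : List Char) (items : List (List Char × String)) (pos : Nat) :
    Option (Nat × String × Nat) :=
  if pos == 0 || (PySem.List.pyGet? cs ((pos : Int) - 1) == some '\n') then pvFindAt cs pos items
  else none

def pvScan (cs : List Char) (items : List (List Char × String)) : Nat → Nat → List (Nat × String × Nat)
  | 0, _ => []
  | fuel + 1, pos =>
    if pos < cs.length then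
      match pvMarkAt cs items pos with
      | none => pvScan cs items fuel (pos + 1)
      | some (_, role, cstart) => (pos, role, cstart) :: pvScan cs items fuel cstart
    else []

-- basics
theorem pv_char_le_iff (a b : Char) : a ≤ b ↔ a.toNat ≤ b.toNat := by
  rw [Char.le_def, UInt32.le_iff_toNat_le]; rfl

theorem pv_lowerChar_idem (c : Char) :
    PySem.Chars.lowerChar (PySem.Chars.lowerChar c) = PySem.Chars.lowerChar c := by
  unfold PySem.Chars.lowerChar PySem.Chars.isupper
  by_cases h1 : 'A' ≤ c
  · by_cases h2 : c ≤ 'Z'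
    · have hA : 'A'.toNat ≤ c.toNat := by rw [pv_char_le_iff] at h1; exact h1
      have hZ : c.toNat ≤ 'Z'.toNat := by rw [pv_char_le_iff] at h2; exact h2
      have hA' : 65 ≤ c.toNat := by simpa using hA
      have hZ' : c.toNat ≤ 90 := by simpa using hZ
      have hval : (Char.ofNat (c.toNat + 32)).toNat = c.toNat + 32 := by
        rw [Char.toNat_ofNat, if_pos]; exact Or.inl (by omega)
      have hne : ¬ (Char.ofNat (c.toNat + 32) ≤ 'Z') := by
        rw [pv_char_le_iff, hval]; simp; omega
      simp [h1, h2, hne]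
    · simp [h2]
  · simp [h1]

theorem pv_lower_idem (l : List Char) :
    PySem.Chars.lower (PySem.Chars.lower l) = PySem.Chars.lower l := by
  unfold PySem.Chars.lower
  rw [List.map_map]
  exact List.map_congr_left (fun a _ => pv_lowerChar_idem a)

theorem pv_lower_length (l : List Char) : (PySem.Chars.lower l).length = l.length := by
  simp [PySem.Chars.lower]

theorem pv_lower_drop (l : List Char) (a : Nat) :
    (PySem.Chars.lower l).drop a = PySem.Chars.lower (l.drop a) := by
  simp [PySem.Chars.lower]

theorem pv_lower_take (l : List Char) (a : Nat) :
    (PySem.Chars.lower l).take a = PySem.Chars.lower (l.take a) := by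
  simp [PySem.Chars.lower]

theorem pv_slice_add {α : Type} (cs : List α) (a l : Nat) :
    PySem.List.slice cs (some (a : Int)) (some ((a : Int) + (l : Int))) = (cs.drop a).take l := by
  have h1 : ((a : Int) + (l : Int)) = ((a + l : Nat) : Int) := by push_cast; ring
  rw [h1, PySem.List.slice_natCast, Nat.add_sub_cancel_left]

theorem pv_slice_add5 {α : Type} (cs : List α) (a l : Nat) :
    PySem.List.slice cs (some ((a : Int) + (l : Int))) (some ((a : Int) + (l : Int) + 5)) = (cs.drop (a + l)).take 5 := by
  have h2 : ((a : Int) + (l : Int) + 5) = ((a + l + 5 : Nat) : Int) := by push_cast; ring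
  have h1 : ((a : Int) + (l : Int)) = ((a + l : Nat) : Int) := by push_cast; ring
  rw [h2, h1, PySem.List.slice_natCast]
  congr 1
  omega

-- ===== dict lemmas =====
theorem pv_table_items (roles : List (String × String)) :
    (pmB_table roles).items = (pmA_ciRoles roles).items.map (fun p => (p.1, p.2.1)) := by
  unfold pmB_table pmA_ciRoles
  generalize (PySem.Dict.ofList roles).items = L
  have main : ∀ (L : List (String × String)) (dA : PySem.Dict (List Char) (String × String))
      (dB : PySem.Dict (List Char) String),
      dB.items = dA.items.map (fun p => (p.1, p.2.1)) →
      (L.foldl (fun d rp => d.insert (PySem.Chars.lower ((PySem.Chars.splitOn rp.2.toList ['\n']).headD [])) rp.1) dB).items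
        = (L.foldl (fun d rp => d.insert (PySem.Chars.lower (pmA_roleName rp.2.toList)) rp) dA).items.map (fun p => (p.1, p.2.1)) := by
    intro L
    induction L with
    | nil => intro dA dB h; simpa using h
    | cons rp rest ih =>
      intro dA dB h
      simp only [List.foldl_cons]
      apply ih
      have hc : dB.contains (PySem.Chars.lower (pmA_roleName rp.2.toList))
          = dA.contains (PySem.Chars.lower (pmA_roleName rp.2.toList)) := by
        simp [PySem.Dict.contains, h, List.any_map, Function.comp_def]
      rw [show PySem.Chars.lower ((PySem.Chars.splitOn rp.2.toList ['\n']).headD [])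
            = PySem.Chars.lower (pmA_roleName rp.2.toList) from rfl]
      rw [PySem.Dict.items_insert, PySem.Dict.items_insert, hc, h]
      by_cases hx : dA.contains (PySem.Chars.lower (pmA_roleName rp.2.toList)) = true
      · simp only [hx, if_true, List.map_map]
        apply List.map_congr_left
        intro p _
        by_cases hp : p.1 = PySem.Chars.lower (pmA_roleName rp.2.toList) <;> simp [hp]
      · rw [if_neg hx, if_neg hx]
        simp
  exact main L _ _ (by simp [PySem.Dict.empty])

-- ===== marker-condition lemmas =====
def pvCondB (cs : List Char) (pos : Nat) (name : List Char) : Bool :=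
  decide (pos + name.length + 5 ≤ cs.length)
    && (PySem.Chars.lower (PySem.List.slice cs (some (pos : Int)) (some ((pos : Int) + (name.length : Int)))) == name)
    && (PySem.List.slice cs (some ((pos : Int) + (name.length : Int))) (some ((pos : Int) + (name.length : Int) + 5)) == ['\n', '-', '-', '-', '\n'])

theorem pv_findAt_cons (cs : List Char) (pos : Nat) (name : List Char) (role : String)
    (rest : List (List Char × String)) :
    pvFindAt cs pos ((name, role) :: rest)
      = if pvCondB cs pos name = true then some (pos, role, pos + name.length + 5)
        else pvFindAt cs pos rest := rfl

theorem pv_condB_iff (cs : List Char) (pos : Nat) (name : List Char) :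
    pvCondB cs pos name = true ↔
      (pos + name.length + 5 ≤ cs.length
        ∧ PySem.Chars.lower ((cs.drop pos).take name.length) = name
        ∧ (cs.drop (pos + name.length)).take 5 = ['\n', '-', '-', '-', '\n']) := by
  unfold pvCondB
  rw [pv_slice_add, pv_slice_add5]
  simp [Bool.and_eq_true, and_assoc]

theorem pv_findAt_eq (cs : List Char) (pos : Nat) (items : List (List Char × String)) :
    pvFindAt cs pos items
      = match items.find? (fun kr => pvCondB cs pos kr.1) with
        | none => none
        | some kr => some (pos, kr.2, pos + kr.1.length + 5) := by
  induction items with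
  | nil => rfl
  | cons kr rest ih =>
    obtain ⟨name, role⟩ := kr
    rw [pv_findAt_cons, List.find?_cons]
    by_cases h : pvCondB cs pos name = true
    · simp [h]
    · rw [if_neg h]
      simp only [Bool.not_eq_true] at h
      rw [h]
      exact ih

theorem pv_bool_ext {a b : Bool} (h : a = true ↔ b = true) : a = b := by
  cases a <;> cases b <;> simp_all

theorem pv_findAt_isSome_iff (cs : List Char) (pos : Nat) (items : List (List Char × String)) :
    (pvFindAt cs pos items).isSome = true ↔ ∃ kr ∈ items, pvCondB cs pos kr.1 = true := by
  rw [pv_findAt_eq]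
  cases hf : items.find? (fun kr => pvCondB cs pos kr.1) with
  | none =>
    simp only [Option.isSome_none]
    constructor
    · intro h; cases h
    · rintro ⟨kr, hmem, hc⟩
      have := List.find?_eq_none.1 hf kr hmem
      simp [hc] at this
  | some kr =>
    simp only [Option.isSome_some, true_iff]
    refine ⟨kr, List.mem_of_find?_eq_some hf, ?_⟩
    have := List.find?_some (p := fun (kr : List Char × String) => pvCondB cs pos kr.1) hf
    simpa using this

theorem pv_findAt_facts (cs : List Char) (pos : Nat) (items : List (List Char × String))
    (m : Nat × String × Nat) (h : pvFindAt cs pos items = some m) :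
    m.1 = pos ∧ pos + 5 ≤ m.2.2 ∧ m.2.2 ≤ cs.length ∧ cs[m.2.2 - 1]? = some '\n' := by
  rw [pv_findAt_eq] at h
  cases hf : items.find? (fun kr => pvCondB cs pos kr.1) with
  | none => rw [hf] at h; cases h
  | some kr =>
    rw [hf] at h
    have hc : pvCondB cs pos kr.1 = true := by
      have := List.find?_some (p := fun (kr : List Char × String) => pvCondB cs pos kr.1) hf
      simpa using this
    obtain ⟨h1, h2, h3⟩ := (pv_condB_iff _ _ _).1 hc
    have hm : m = (pos, kr.2, pos + kr.1.length + 5) := by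
      injection h with h'; exact h'.symm
    subst hm
    dsimp only
    refine ⟨rfl, by omega, by omega, ?_⟩
    have h4 : ((cs.drop (pos + kr.1.length)).take 5)[4]? = some '\n' := by rw [h3]; rfl
    rw [List.getElem?_take, List.getElem?_drop] at h4
    show cs[pos + kr.1.length + 5 - 1]? = some '\n'
    have he : pos + kr.1.length + 5 - 1 = pos + kr.1.length + 4 := by omega
    rw [he]
    simpa using h4

def pvCondA (cs : List Char) (pos : Nat) (k : List Char) : Bool :=
  (PySem.Chars.lower (PySem.List.slice cs (some (pos : Int)) (some ((pos : Int) + (k.length : Int)))) == PySem.Chars.lower k)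
    && decide (pos + k.length + 5 ≤ cs.length)
    && (PySem.List.slice cs (some ((pos : Int) + (k.length : Int))) (some ((pos : Int) + (k.length : Int) + 5)) == ['\n', '-', '-', '-', '\n'])

theorem pv_headMatch_cons (cs : List Char) (pos : Nat) (k : List Char) (rp : String × String)
    (rest : List (List Char × String × String)) :
    pmA_headMatch cs pos ((k, rp) :: rest)
      = if pos + k.length ≤ cs.length then
          (if pvCondA cs pos k = true then some (rp.1, k.length) else pmA_headMatch cs pos rest)
        else pmA_headMatch cs pos rest := rfl

theorem pv_condA_eq_condB (cs : List Char) (pos : Nat) (k : List Char)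
    (hkk : PySem.Chars.lower k = k) (_hl : pos + k.length ≤ cs.length) :
    pvCondA cs pos k = pvCondB cs pos k := by
  apply pv_bool_ext
  unfold pvCondA pvCondB
  rw [hkk]
  simp only [Bool.and_eq_true]
  constructor
  · rintro ⟨⟨a, b⟩, c⟩; exact ⟨⟨b, a⟩, c⟩
  · rintro ⟨⟨a, b⟩, c⟩; exact ⟨⟨b, a⟩, c⟩

theorem pv_headMatch_eq (cs : List Char) (pos : Nat) :
    ∀ itemsA : List (List Char × String × String),
      (∀ p ∈ itemsA, PySem.Chars.lower p.1 = p.1) →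
      pmA_headMatch cs pos itemsA
        = (pvFindAt cs pos (itemsA.map (fun p => (p.1, p.2.1)))).map
            (fun m => (m.2.1, m.2.2 - (pos + 5))) := by
  intro itemsA
  induction itemsA with
  | nil => intro _; rfl
  | cons kv rest ih =>
    intro hk
    obtain ⟨k, rp⟩ := kv
    have hkk : PySem.Chars.lower k = k := hk (k, rp) (by simp)
    have hrest := ih (fun p hp => hk p (by simp [hp]))
    simp only [List.map_cons]
    rw [pv_headMatch_cons, pv_findAt_cons]
    by_cases hc : pvCondB cs pos k = true
    · obtain ⟨h1, _, _⟩ := (pv_condB_iff _ _ _).1 hc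
      have hl : pos + k.length ≤ cs.length := by omega
      rw [if_pos hl, pv_condA_eq_condB cs pos k hkk hl, if_pos hc, if_pos hc]
      simp only [Option.map_some]
      congr 2
      omega
    · rw [if_neg hc]
      by_cases hl : pos + k.length ≤ cs.length
      · rw [if_pos hl, pv_condA_eq_condB cs pos k hkk hl, if_neg hc, hrest]
      · rw [if_neg hl, hrest]

-- ===== per-role search lemmas =====
def pvRelValid (remaining k : List Char) (q : Nat) : Bool :=
  (q == 0 || (PySem.List.pyGet? remaining ((q : Int) - 1) == some '\n'))
    && decide (q + k.length + 5 ≤ remaining.length)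
    && (PySem.List.slice remaining (some ((q : Int) + (k.length : Int))) (some ((q : Int) + (k.length : Int) + 5)) == ['\n', '-', '-', '-', '\n'])
    && (PySem.Chars.lower (PySem.List.slice remaining (some (q : Int)) (some ((q : Int) + (k.length : Int)))) == PySem.Chars.lower k)

theorem pv_prefix_drop_infix {sub W : List Char} {a : Nat} (h : sub <+: W.drop a) : sub <:+: W :=
  h.isInfix.trans (List.drop_suffix a W).isInfix

theorem pv_relValid_occ (remaining k : List Char) (q : Nat) (h : pvRelValid remaining k q = true) :
    PySem.Chars.lower k <+: (PySem.Chars.lower remaining).drop q ∧ q + k.length + 5 ≤ remaining.length := by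
  unfold pvRelValid at h
  rw [pv_slice_add] at h
  simp only [Bool.and_eq_true, beq_iff_eq, decide_eq_true_eq] at h
  obtain ⟨⟨⟨_, hlen⟩, _⟩, hlow⟩ := h
  refine ⟨?_, hlen⟩
  rw [pv_lower_drop, ← hlow, ← pv_lower_take]
  exact List.take_prefix _ _

theorem pv_searchRole_spec (remaining k : List Char) :
    ∀ (fuel searchPos : Nat), remaining.length + 1 ≤ fuel + searchPos →
    (match pmA_searchRole remaining k fuel searchPos with
      | some np => searchPos ≤ np ∧ pvRelValid remaining k np = true ∧
          ∀ q, searchPos ≤ q → q < np → pvRelValid remaining k q = false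
      | none => ∀ q, searchPos ≤ q → pvRelValid remaining k q = false) := by
  intro fuel
  induction fuel with
  | zero =>
    intro searchPos hf
    simp only [pmA_searchRole]
    intro q hq
    unfold pvRelValid
    have hno : ¬ (q + k.length + 5 ≤ remaining.length) := by omega
    simp [hno]
  | succ fuel ih =>
    intro searchPos hf
    simp only [pmA_searchRole]
    by_cases hsp : searchPos < remaining.length
    · rw [if_pos hsp]
      have hle : searchPos ≤ (PySem.Chars.lower remaining).length := by
        rw [pv_lower_length]; omega
      by_cases hm1 : PySem.Chars.findFrom (PySem.Chars.lower remaining) (PySem.Chars.lower k) (searchPos : Int) = -1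
      · rw [if_pos (by simpa using hm1)]
        have hnocc := (PySem.Chars.findFrom_natCast_eq_neg_one_iff (PySem.Chars.lower remaining) (PySem.Chars.lower k) searchPos hle).1 hm1
        intro q hq
        by_contra hne
        rw [Bool.not_eq_false] at hne
        obtain ⟨hocc, _⟩ := pv_relValid_occ remaining k q hne
        apply hnocc
        have : (PySem.Chars.lower remaining).drop q
            = ((PySem.Chars.lower remaining).drop searchPos).drop (q - searchPos) := by
          rw [List.drop_drop]; congr 1; omega
        rw [this] at hocc
        exact pv_prefix_drop_infix hocc
      · rw [if_neg (by simpa using hm1)]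
        obtain ⟨hge, hocc, hmin⟩ := PySem.Chars.findFrom_natCast_spec (PySem.Chars.lower remaining) (PySem.Chars.lower k) searchPos hle hm1
        set next := PySem.Chars.findFrom (PySem.Chars.lower remaining) (PySem.Chars.lower k) (searchPos : Int) with hnextdef
        set np := next.toNat with hnpdef
        have hspnp : searchPos ≤ np := by omega
        have hminv : ∀ q, searchPos ≤ q → q < np → pvRelValid remaining k q = false := by
          intro q h1 h2
          by_contra hne
          rw [Bool.not_eq_false] at hne
          obtain ⟨ho, _⟩ := pv_relValid_occ remaining k q hne
          exact hmin q h1 h2 ho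
        by_cases hcond : pvRelValid remaining k np = true
        · rw [show ((np == 0 || (PySem.List.pyGet? remaining ((np : Int) - 1) == some '\n'))
              && decide (np + k.length + 5 ≤ remaining.length)
              && (PySem.List.slice remaining (some ((np : Int) + (k.length : Int))) (some ((np : Int) + (k.length : Int) + 5)) == ['\n', '-', '-', '-', '\n'])
              && (PySem.Chars.lower (PySem.List.slice remaining (some (np : Int)) (some ((np : Int) + (k.length : Int)))) == PySem.Chars.lower k))
              = pvRelValid remaining k np from rfl, hcond, if_pos rfl]
          exact ⟨hspnp, hcond, hminv⟩
        · rw [show ((np == 0 || (PySem.List.pyGet? remaining ((np : Int) - 1) == some '\n'))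
              && decide (np + k.length + 5 ≤ remaining.length)
              && (PySem.List.slice remaining (some ((np : Int) + (k.length : Int))) (some ((np : Int) + (k.length : Int) + 5)) == ['\n', '-', '-', '-', '\n'])
              && (PySem.Chars.lower (PySem.List.slice remaining (some (np : Int)) (some ((np : Int) + (k.length : Int)))) == PySem.Chars.lower k))
              = pvRelValid remaining k np from rfl]
          rw [if_neg (by simp [hcond])]
          have hrec := ih (np + 1) (by omega)
          cases hres : pmA_searchRole remaining k fuel (np + 1) with
          | none =>
            rw [hres] at hrec
            intro q hq
            rcases Nat.lt_trichotomy q np with h | h | h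
            · exact hminv q hq h
            · subst h; exact Bool.eq_false_iff.mpr (fun hx => hcond hx)
            · exact hrec q (by omega)
          | some np' =>
            rw [hres] at hrec
            obtain ⟨h1, h2, h3⟩ := hrec
            refine ⟨by omega, h2, ?_⟩
            intro q hq hlt
            rcases Nat.lt_trichotomy q np with h | h | h
            · exact hminv q hq h
            · subst h; exact Bool.eq_false_iff.mpr (fun hx => hcond hx)
            · exact h3 q (by omega) hlt
    · rw [if_neg hsp]
      intro q hq
      unfold pvRelValid
      have hno : ¬ (q + k.length + 5 ≤ remaining.length) := by omega
      simp [hno]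

-- ===== absolute/relative bridge =====
def pvLS (cs : List Char) (pos : Nat) : Bool :=
  pos == 0 || (PySem.List.pyGet? cs ((pos : Int) - 1) == some '\n')

theorem pv_pyGet_pred (cs : List Char) (pos : Nat) (h : 1 ≤ pos) :
    PySem.List.pyGet? cs ((pos : Int) - 1) = cs[pos - 1]? := by
  have he : ((pos : Int) - 1) = ((pos - 1 : Nat) : Int) := by omega
  rw [he, PySem.List.pyGet?_natCast]

theorem pv_LS_abs (cs : List Char) (s q : Nat) (hls : pvLS cs s = true) :
    (q == 0 || (PySem.List.pyGet? (cs.drop s) ((q : Int) - 1) == some '\n')) = pvLS cs (s + q) := by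
  apply pv_bool_ext
  by_cases hq : q = 0
  · subst hq
    simp only [Nat.add_zero]
    simp [hls]
  · have h1 : (q == 0) = false := by simp [hq]
    have hq1 : 1 ≤ q := by omega
    rw [pv_pyGet_pred (cs.drop s) q hq1]
    unfold pvLS
    have h2 : (s + q == 0) = false := by simp; omega
    rw [pv_pyGet_pred cs (s + q) (by omega)]
    rw [List.getElem?_drop]
    have he : s + (q - 1) = s + q - 1 := by omega
    rw [he]
    simp [h1, h2]

theorem pv_condB_drop (cs : List Char) (s q : Nat) (k : List Char) (hs : s ≤ cs.length) :
    pvCondB (cs.drop s) q k = pvCondB cs (s + q) k := by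
  apply pv_bool_ext
  rw [pv_condB_iff, pv_condB_iff]
  rw [List.drop_drop, List.drop_drop, List.length_drop]
  have e1 : s + (q + k.length) = s + q + k.length := by omega
  rw [e1]
  constructor
  · rintro ⟨a, b, c⟩; exact ⟨by omega, b, c⟩
  · rintro ⟨a, b, c⟩; exact ⟨by omega, b, c⟩

theorem pv_relValid_eq (remaining k : List Char) (q : Nat) (hk : PySem.Chars.lower k = k) :
    pvRelValid remaining k q
      = ((q == 0 || (PySem.List.pyGet? remaining ((q : Int) - 1) == some '\n')) && pvCondB remaining q k) := by
  apply pv_bool_ext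
  unfold pvRelValid pvCondB
  rw [hk]
  simp only [Bool.and_eq_true]
  constructor
  · rintro ⟨⟨⟨a, b⟩, c⟩, d⟩; exact ⟨a, ⟨b, d⟩, c⟩
  · rintro ⟨a, ⟨b, d⟩, c⟩; exact ⟨⟨⟨a, b⟩, c⟩, d⟩

theorem pv_relValid_abs (cs : List Char) (s q : Nat) (k : List Char)
    (hs : s ≤ cs.length) (hls : pvLS cs s = true) (hk : PySem.Chars.lower k = k) :
    pvRelValid (cs.drop s) k q = (pvLS cs (s + q) && pvCondB cs (s + q) k) := by
  rw [pv_relValid_eq _ _ _ hk, pv_LS_abs cs s q hls, pv_condB_drop cs s q k hs]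

-- ===== markAt / P =====
def pvP (cs : List Char) (items : List (List Char × String)) (pos : Nat) : Bool :=
  (pvMarkAt cs items pos).isSome

theorem pv_markAt_eq (cs : List Char) (items : List (List Char × String)) (pos : Nat) :
    pvMarkAt cs items pos
      = if pvLS cs pos = true then pvFindAt cs pos items else none := rfl

theorem pv_P_iff (cs : List Char) (items : List (List Char × String)) (pos : Nat) :
    pvP cs items pos = true ↔ (pvLS cs pos = true ∧ ∃ kr ∈ items, pvCondB cs pos kr.1 = true) := by
  unfold pvP
  rw [pv_markAt_eq]
  by_cases h : pvLS cs pos = true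
  · simp [h, pv_findAt_isSome_iff]
  · simp [h]

-- ===== end-position search = next marker =====
theorem pv_slice_from_nat {α : Type} (cs : List α) (s : Nat) :
    PySem.List.slice cs (some (s : Int)) none = cs.drop s := by
  rw [PySem.List.slice_from cs (by positivity)]
  simp

def pvStepA (cs : List Char) (s : Nat) (endPos : Nat) (kv : List Char × String × String) : Nat :=
  let remaining := PySem.List.slice cs (some (s : Int)) none
  match pmA_searchRole remaining kv.1 (remaining.length + 1) 0 with
  | some np => if s + np < endPos then s + np else endPos
  | none => endPos

theorem pv_endPos_eq (cs : List Char) (s : Nat) (itemsA : List (List Char × String × String)) :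
    pmA_endPos cs s itemsA = itemsA.foldl (pvStepA cs s) cs.length := rfl

theorem pv_stepA_eq (cs : List Char) (s acc : Nat) (kv : List Char × String × String) :
    pvStepA cs s acc kv
      = match pmA_searchRole (cs.drop s) kv.1 ((cs.drop s).length + 1) 0 with
        | some np => if s + np < acc then s + np else acc
        | none => acc := by
  unfold pvStepA
  rw [pv_slice_from_nat]

theorem pv_endPos_spec (cs : List Char) (itemsA : List (List Char × String × String)) (s : Nat)
    (hk : ∀ p ∈ itemsA, PySem.Chars.lower p.1 = p.1)
    (hs : s ≤ cs.length) (hls : pvLS cs s = true) :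
    s ≤ pmA_endPos cs s itemsA ∧ pmA_endPos cs s itemsA ≤ cs.length
      ∧ (pmA_endPos cs s itemsA < cs.length →
          pvP cs (itemsA.map (fun p => (p.1, p.2.1))) (pmA_endPos cs s itemsA) = true)
      ∧ ∀ q, s ≤ q → q < pmA_endPos cs s itemsA →
          pvP cs (itemsA.map (fun p => (p.1, p.2.1))) q = false := by
  have hPof : ∀ kv ∈ itemsA, ∀ q, pvRelValid (cs.drop s) kv.1 q = true →
      pvP cs (itemsA.map (fun p => (p.1, p.2.1))) (s + q) = true := by
    intro kv hkv q hval
    rw [pv_relValid_abs cs s q kv.1 hs hls (hk kv hkv), Bool.and_eq_true] at hval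
    rw [pv_P_iff]
    exact ⟨hval.1, ⟨(kv.1, kv.2.1), List.mem_map_of_mem hkv, hval.2⟩⟩
  have aux : ∀ (L : List (List Char × String × String)), (∀ p ∈ L, p ∈ itemsA) →
      ∀ acc : Nat, s ≤ acc → acc ≤ cs.length →
      (acc < cs.length → pvP cs (itemsA.map (fun p => (p.1, p.2.1))) acc = true) →
      (s ≤ L.foldl (pvStepA cs s) acc
        ∧ L.foldl (pvStepA cs s) acc ≤ cs.length
        ∧ (L.foldl (pvStepA cs s) acc < cs.length →
            pvP cs (itemsA.map (fun p => (p.1, p.2.1))) (L.foldl (pvStepA cs s) acc) = true)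
        ∧ L.foldl (pvStepA cs s) acc ≤ acc
        ∧ ∀ kv ∈ L, ∀ q, pvRelValid (cs.drop s) kv.1 q = true →
            L.foldl (pvStepA cs s) acc ≤ s + q) := by
    intro L
    induction L with
    | nil =>
      intro _ acc h1 h2 h3
      simp only [List.foldl_nil]
      exact ⟨h1, h2, h3, le_refl _, by intro kv hkv; cases hkv⟩
    | cons kv rest ih =>
      intro hsub acc h1 h2 h3
      simp only [List.foldl_cons]
      have hspec := pv_searchRole_spec (cs.drop s) kv.1 ((cs.drop s).length + 1) 0 (by omega)
      cases hres : pmA_searchRole (cs.drop s) kv.1 ((cs.drop s).length + 1) 0 with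
      | none =>
        rw [hres] at hspec
        rw [show pvStepA cs s acc kv = acc by rw [pv_stepA_eq, hres]]
        have := ih (fun p hp => hsub p (by simp [hp])) acc h1 h2 h3
        refine ⟨this.1, this.2.1, this.2.2.1, this.2.2.2.1, ?_⟩
        intro kv' hkv' q hval
        rcases List.mem_cons.1 hkv' with rfl | hmem
        · exact absurd hval (by simp [hspec q (Nat.zero_le q)])
        · exact this.2.2.2.2 kv' hmem q hval
      | some np =>
        rw [hres] at hspec
        obtain ⟨_, hvalnp, hminnp⟩ := hspec
        have hlen : np + kv.1.length + 5 ≤ (cs.drop s).length := (pv_relValid_occ _ _ _ hvalnp).2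
        have hnp_le : s + np ≤ cs.length := by
          rw [List.length_drop] at hlen; omega
        rw [show pvStepA cs s acc kv = if s + np < acc then s + np else acc by rw [pv_stepA_eq, hres]]
        set acc' := if s + np < acc then s + np else acc with hacc'
        have h1' : s ≤ acc' := by rw [hacc']; split <;> omega
        have h2' : acc' ≤ cs.length := by rw [hacc']; split <;> omega
        have h3' : acc' < cs.length → pvP cs (itemsA.map (fun p => (p.1, p.2.1))) acc' = true := by
          intro _
          rw [hacc']
          by_cases hlt : s + np < acc
          · rw [if_pos hlt]
            exact hPof kv (hsub kv (by simp)) np hvalnp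
          · rw [if_neg hlt]
            apply h3
            have : acc' = acc := by rw [hacc', if_neg hlt]
            omega
        have := ih (fun p hp => hsub p (by simp [hp])) acc' h1' h2' h3'
        have hacc'le : acc' ≤ acc := by rw [hacc']; split <;> omega
        have hacc'np : acc' ≤ s + np := by rw [hacc']; split <;> omega
        refine ⟨this.1, this.2.1, this.2.2.1, le_trans this.2.2.2.1 hacc'le, ?_⟩
        intro kv' hkv' q hval
        rcases List.mem_cons.1 hkv' with rfl | hmem
        · have hnpq : np ≤ q := by
            by_contra hc
            have := hminnp q (Nat.zero_le q) (by omega)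
            rw [hval] at this
            cases this
          exact le_trans this.2.2.2.1 (le_trans hacc'np (by omega))
        · exact this.2.2.2.2 kv' hmem q hval
  have hmain := aux itemsA (fun p hp => hp) cs.length hs (le_refl _) (by intro h; omega)
  rw [pv_endPos_eq]
  refine ⟨hmain.1, hmain.2.1, hmain.2.2.1, ?_⟩
  intro q hq hlt
  by_contra hne
  rw [Bool.not_eq_false] at hne
  rw [pv_P_iff] at hne
  obtain ⟨hlsq, kr, hkr, hcond⟩ := hne
  obtain ⟨kv, hkv, rfl⟩ := List.mem_map.1 hkr
  have hval : pvRelValid (cs.drop s) kv.1 (q - s) = true := by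
    rw [pv_relValid_abs cs s (q - s) kv.1 hs hls (hk kv hkv)]
    have he : s + (q - s) = q := by omega
    rw [he, Bool.and_eq_true]
    exact ⟨hlsq, hcond⟩
  have := hmain.2.2.2.2 kv hkv (q - s) hval
  omega

-- ===== scan lemmas =====
theorem pv_scan_stop (cs : List Char) (items : List (List Char × String)) (fuel pos : Nat)
    (h : ¬ pos < cs.length) : pvScan cs items fuel pos = [] := by
  cases fuel <;> simp [pvScan, h]

theorem pv_scan_succ (cs : List Char) (items : List (List Char × String)) (fuel pos : Nat)
    (h : pos < cs.length) :
    pvScan cs items (fuel + 1) pos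
      = match pvMarkAt cs items pos with
        | none => pvScan cs items fuel (pos + 1)
        | some (_, role, cstart) => (pos, role, cstart) :: pvScan cs items fuel cstart := by
  simp [pvScan, h]

theorem pv_markAt_facts (cs : List Char) (items : List (List Char × String)) (pos : Nat)
    (m : Nat × String × Nat) (h : pvMarkAt cs items pos = some m) :
    m.1 = pos ∧ pos + 5 ≤ m.2.2 ∧ m.2.2 ≤ cs.length ∧ cs[m.2.2 - 1]? = some '\n' := by
  rw [pv_markAt_eq] at h
  by_cases hls : pvLS cs pos = true
  · rw [if_pos hls] at h
    exact pv_findAt_facts cs pos items m h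
  · rw [if_neg hls] at h
    cases h

theorem pv_scan_fuel (cs : List Char) (items : List (List Char × String)) :
    ∀ (n pos fuel1 fuel2 : Nat), cs.length - pos ≤ n →
      cs.length < fuel1 + pos → cs.length < fuel2 + pos →
      pvScan cs items fuel1 pos = pvScan cs items fuel2 pos := by
  intro n
  induction n with
  | zero =>
    intro pos f1 f2 h _ _
    rw [pv_scan_stop cs items f1 pos (by omega), pv_scan_stop cs items f2 pos (by omega)]
  | succ n ih =>
    intro pos f1 f2 h hf1 hf2
    by_cases hp : pos < cs.length
    · match f1, f2 with
      | g1 + 1, g2 + 1 =>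
        rw [pv_scan_succ cs items g1 pos hp, pv_scan_succ cs items g2 pos hp]
        cases hm : pvMarkAt cs items pos with
        | none => exact ih (pos + 1) g1 g2 (by omega) (by omega) (by omega)
        | some m =>
          obtain ⟨p, role, c⟩ := m
          have hf := pv_markAt_facts cs items pos _ hm
          simp only at hf
          show (pos, role, c) :: pvScan cs items g1 c = (pos, role, c) :: pvScan cs items g2 c
          congr 1
          exact ih c g1 g2 (by omega) (by omega) (by omega)
      | 0, _ => omega
      | _ + 1, 0 => omega
    · rw [pv_scan_stop cs items f1 pos hp, pv_scan_stop cs items f2 pos hp]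

theorem pv_scan_skip (cs : List Char) (items : List (List Char × String)) :
    ∀ (n pos e fuel1 fuel2 : Nat), e - pos ≤ n → pos ≤ e → e ≤ cs.length →
      (∀ q, pos ≤ q → q < e → pvP cs items q = false) →
      cs.length < fuel1 + pos → cs.length < fuel2 + e →
      pvScan cs items fuel1 pos = pvScan cs items fuel2 e := by
  intro n
  induction n with
  | zero =>
    intro pos e f1 f2 h1 h2 _ _ hf1 hf2
    have : pos = e := by omega
    subst this
    exact pv_scan_fuel cs items (cs.length - pos) pos f1 f2 (le_refl _) hf1 hf2
  | succ n ih =>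
    intro pos e f1 f2 h1 h2 h3 hnoP hf1 hf2
    by_cases hpe : pos = e
    · subst hpe
      exact pv_scan_fuel cs items (cs.length - pos) pos f1 f2 (le_refl _) hf1 hf2
    · have hlt : pos < e := by omega
      have hp : pos < cs.length := by omega
      match f1 with
      | g1 + 1 =>
        rw [pv_scan_succ cs items g1 pos hp]
        have hnone : pvMarkAt cs items pos = none := by
          have := hnoP pos (le_refl _) hlt
          unfold pvP at this
          exact Option.not_isSome_iff_eq_none.1 (by simp [this])
        rw [hnone]
        exact ih (pos + 1) e g1 f2 (by omega) (by omega) h3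
          (fun q hq1 hq2 => hnoP q (by omega) hq2) (by omega) hf2
      | 0 => omega

theorem pv_P_lt (cs : List Char) (items : List (List Char × String)) (pos : Nat)
    (h : pvP cs items pos = true) : pos + 5 ≤ cs.length := by
  rw [pv_P_iff] at h
  obtain ⟨_, kr, _, hc⟩ := h
  have := (pv_condB_iff _ _ _).1 hc
  omega

theorem pv_loop_stop (content : String) (cs : List Char)
    (itemsA : List (List Char × String × String)) (fuel pos : Nat) (h : ¬ pos < cs.length) :
    pmA_loop content cs itemsA fuel pos = [] := by
  cases fuel <;> simp [pmA_loop, h]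

-- ===== main equivalence on marker positions =====
theorem pv_assemble_cons (cs : List Char) (p : Nat) (r : String) (c : Nat)
    (rest : List (Nat × String × Nat)) :
    pmB_assemble cs ((p, r, c) :: rest)
      = [("role", r), ("content", String.ofList (PySem.Chars.strip (PySem.List.slice cs (some (c : Int)) (some (((match rest with | [] => cs.length | (q, _, _) :: _ => q) : Nat) : Int)))))]
        :: pmB_assemble cs rest := rfl

theorem pv_loop_succ (content : String) (cs : List Char)
    (itemsA : List (List Char × String × String)) (fuel pos : Nat)
    (hp : pos < cs.length) (hls : pvLS cs pos = true) :
    pmA_loop content cs itemsA (fuel + 1) pos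
      = match pmA_headMatch cs pos itemsA with
        | none => [[("role", "system"), ("content", PySem.Str.strip content)]]
        | some (role, klen) =>
          [("role", role), ("content", String.ofList (PySem.Chars.strip (PySem.List.slice cs (some ((pos + klen + 5 : Nat) : Int)) (some ((pmA_endPos cs (pos + klen + 5) itemsA : Nat) : Int)))))]
            :: pmA_loop content cs itemsA fuel (pmA_endPos cs (pos + klen + 5) itemsA) := by
  have hls' : (!(pos == 0 || (PySem.List.pyGet? cs ((pos : Int) - 1) == some '\n'))) = false := by
    have h0 : (pos == 0 || (PySem.List.pyGet? cs ((pos : Int) - 1) == some '\n')) = pvLS cs pos := rfl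
    rw [h0, hls]
    rfl
  simp only [pmA_loop, hp, if_true, hls', Bool.false_eq_true, if_false]

theorem pv_main (content : String) (cs : List Char) (itemsA : List (List Char × String × String))
    (hk : ∀ p ∈ itemsA, PySem.Chars.lower p.1 = p.1) :
    ∀ (n pos fa fb : Nat), cs.length - pos ≤ n → pos ≤ cs.length →
      pvP cs (itemsA.map (fun p => (p.1, p.2.1))) pos = true →
      cs.length < fa + pos → cs.length < fb + pos →
      pmA_loop content cs itemsA fa pos
        = pmB_assemble cs (pvScan cs (itemsA.map (fun p => (p.1, p.2.1))) fb pos) := by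
  intro n
  induction n with
  | zero =>
    intro pos fa fb hn hle hP _ _
    have := pv_P_lt cs _ pos hP
    omega
  | succ n ih =>
    intro pos fa fb hn hle hP hfa hfb
    have hp5 := pv_P_lt cs _ pos hP
    have hp : pos < cs.length := by omega
    obtain ⟨m, hm⟩ := Option.isSome_iff_exists.1 hP
    obtain ⟨p0, r, c⟩ := m
    have hf := pv_markAt_facts cs _ pos _ hm
    simp only at hf
    obtain ⟨rfl, hc5, hcle, hcnl⟩ := hf
    have hfind : pvFindAt cs p0 (itemsA.map (fun p => (p.1, p.2.1))) = some (p0, r, c) := by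
      rw [pv_markAt_eq] at hm
      by_cases hls : pvLS cs p0 = true
      · rwa [if_pos hls] at hm
      · rw [if_neg hls] at hm; cases hm
    have hls : pvLS cs p0 = true := by
      rw [pv_markAt_eq] at hm
      by_cases hls : pvLS cs p0 = true
      · exact hls
      · rw [if_neg hls] at hm; cases hm
    match fa, fb with
    | fa' + 1, fb' + 1 =>
      rw [pv_loop_succ content cs itemsA fa' p0 hp hls]
      rw [pv_headMatch_eq cs p0 itemsA hk, hfind]
      simp only [Option.map_some]
      have hcc : p0 + (c - (p0 + 5)) + 5 = c := by omega
      rw [hcc]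
      have hlsc : pvLS cs c = true := by
        unfold pvLS
        rw [pv_pyGet_pred cs c (by omega), hcnl]
        simp
      have hspec := pv_endPos_spec cs itemsA c hk hcle hlsc
      obtain ⟨hce, hele, hPe, hmin⟩ := hspec
      rw [pv_scan_succ cs _ fb' p0 hp, hm]
      dsimp only
      rw [pv_scan_skip cs _ (pmA_endPos cs c itemsA - c) c (pmA_endPos cs c itemsA) fb' fb'
        (le_refl _) hce hele hmin (by omega) (by omega)]
      by_cases hEnd : pmA_endPos cs c itemsA < cs.length
      · -- a next marker exists at the end position
        have hPe' := hPe hEnd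
        obtain ⟨m', hm'⟩ := Option.isSome_iff_exists.1 hPe'
        obtain ⟨e0, r', c'⟩ := m'
        have hf' := pv_markAt_facts cs _ _ _ hm'
        simp only at hf'
        rw [hf'.1] at hm'
        obtain ⟨fb'', rfl⟩ : ∃ g, fb' = g + 1 := ⟨fb' - 1, by omega⟩
        have hscan_e : pvScan cs (itemsA.map (fun p => (p.1, p.2.1))) (fb'' + 1) (pmA_endPos cs c itemsA)
            = (pmA_endPos cs c itemsA, r', c') :: pvScan cs (itemsA.map (fun p => (p.1, p.2.1))) fb'' c' := by
          rw [pv_scan_succ cs _ fb'' _ hEnd, hm']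
        rw [hscan_e, pv_assemble_cons]
        dsimp only
        congr 1
        rw [← hscan_e]
        exact ih (pmA_endPos cs c itemsA) fa' (fb'' + 1) (by omega) (by omega) hPe' (by omega) (by omega)
      · -- the end position is the end of the content: no further markers
        rw [pv_scan_stop cs _ fb' _ hEnd, pv_assemble_cons]
        dsimp only
        have heq : pmA_endPos cs c itemsA = cs.length := by omega
        rw [heq, pv_loop_stop content cs itemsA fa' cs.length (by omega)]
        rfl
    | 0, _ => omega
    | _ + 1, 0 => omega


-- ===== the line decomposition: splitOn '\n' characterised =====
def pvSplit1 : List Char → List (List Char)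
  | [] => [[]]
  | c :: r =>
    if c = '\n' then [] :: pvSplit1 r
    else match pvSplit1 r with
         | [] => [[c]]
         | h :: t => (c :: h) :: t

theorem pvSplit1_ne_nil (l : List Char) : pvSplit1 l ≠ [] := by
  cases l with
  | nil => simp [pvSplit1]
  | cons c r =>
    simp only [pvSplit1]
    split
    · simp
    · split <;> simp

theorem pv_go_eq (l : List Char) : ∀ (fuel : Nat) (cur : List Char) (acc : List (List Char)),
    l.length < fuel →
    PySem.Chars.splitOn.go ['\n'] fuel l cur acc
      = acc.reverse ++ (match pvSplit1 l with
          | [] => []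
          | h :: t => (cur.reverse ++ h) :: t) := by
  induction l with
  | nil =>
    intro fuel cur acc hf
    match fuel with
    | f + 1 => simp [PySem.Chars.splitOn.go, pvSplit1]
  | cons c r ih =>
    intro fuel cur acc hf
    match fuel with
    | f + 1 =>
      by_cases hc : c = '\n'
      · subst hc
        have hpre : List.isPrefixOf ['\n'] ('\n' :: r) = true := by simp [List.isPrefixOf]
        rw [show PySem.Chars.splitOn.go ['\n'] (f + 1) ('\n' :: r) cur acc
              = PySem.Chars.splitOn.go ['\n'] f (List.drop 1 ('\n' :: r)) [] (cur.reverse :: acc) by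
            simp [PySem.Chars.splitOn.go, hpre]]
        simp only [List.drop_succ_cons, List.drop_zero]
        rw [ih f [] (cur.reverse :: acc) (by simp at hf ⊢; omega)]
        cases hs : pvSplit1 r with
        | nil => exact absurd hs (pvSplit1_ne_nil r)
        | cons h t => simp [pvSplit1, hs]
      · have hpre : List.isPrefixOf ['\n'] (c :: r) = false := by
          simp [List.isPrefixOf]
          intro h
          exact absurd h.symm hc
        rw [show PySem.Chars.splitOn.go ['\n'] (f + 1) (c :: r) cur acc
              = PySem.Chars.splitOn.go ['\n'] f r (c :: cur) acc by
            simp [PySem.Chars.splitOn.go, hpre]]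
        rw [ih f (c :: cur) acc (by simp at hf ⊢; omega)]
        cases hs : pvSplit1 r with
        | nil => exact absurd hs (pvSplit1_ne_nil r)
        | cons h t => simp [pvSplit1, hc, hs]

theorem pv_splitOn_eq (l : List Char) : PySem.Chars.splitOn l ['\n'] = pvSplit1 l := by
  unfold PySem.Chars.splitOn
  rw [pv_go_eq l (l.length + 1) [] [] (by omega)]
  cases hs : pvSplit1 l with
  | nil => exact absurd hs (pvSplit1_ne_nil l)
  | cons h t => simp

theorem pvSplit1_no_nl (l : List Char) : ∀ p ∈ pvSplit1 l, '\n' ∉ p := by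
  induction l with
  | nil =>
    intro p hp
    simp [pvSplit1] at hp
    subst hp
    simp
  | cons c r ih =>
    intro p hp
    by_cases hc : c = '\n'
    · subst hc
      rw [show pvSplit1 ('\n' :: r) = [] :: pvSplit1 r from by simp [pvSplit1]] at hp
      rcases List.mem_cons.1 hp with rfl | hp2
      · simp
      · exact ih p hp2
    · simp only [pvSplit1, if_neg hc] at hp
      cases hs : pvSplit1 r with
      | nil => exact absurd hs (pvSplit1_ne_nil r)
      | cons h t =>
        rw [hs] at hp
        rcases List.mem_cons.1 hp with rfl | hp2
        · intro hmem
          rcases List.mem_cons.1 hmem with h1 | h2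
          · exact hc h1.symm
          · exact ih h (by rw [hs]; simp) h2
        · exact ih p (by rw [hs]; simp [hp2])

def pvJoins : List (List Char) → List Char
  | [] => []
  | [l] => l
  | l :: r :: t => l ++ '\n' :: pvJoins (r :: t)

def pvTail (L : List (List Char)) : List Char :=
  match L with
  | [] => []
  | _ :: _ => '\n' :: pvJoins L

theorem pvJoins_cons (l : List Char) (r : List (List Char)) :
    pvJoins (l :: r) = l ++ pvTail r := by
  cases r <;> simp [pvJoins, pvTail]

theorem pvJoins_split1 (l : List Char) : pvJoins (pvSplit1 l) = l := by
  induction l with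
  | nil => rfl
  | cons c r ih =>
    by_cases hc : c = '\n'
    · subst hc
      rw [show pvSplit1 ('\n' :: r) = [] :: pvSplit1 r from by simp [pvSplit1]]
      rw [pvJoins_cons]
      cases hs : pvSplit1 r with
      | nil => exact absurd hs (pvSplit1_ne_nil r)
      | cons h t =>
        show [] ++ pvTail (h :: t) = '\n' :: r
        rw [List.nil_append]
        show '\n' :: pvJoins (h :: t) = '\n' :: r
        rw [← hs, ih]
    · simp only [pvSplit1, if_neg hc]
      cases hs : pvSplit1 r with
      | nil => exact absurd hs (pvSplit1_ne_nil r)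
      | cons h t =>
        rw [pvJoins_cons]
        show c :: (h ++ pvTail t) = c :: r
        rw [← pvJoins_cons, ← hs, ih]

theorem pv_lowerChar_ne_nl (c : Char) (h : PySem.Chars.lowerChar c = '\n') : c = '\n' := by
  unfold PySem.Chars.lowerChar PySem.Chars.isupper at h
  by_cases h1 : 'A' ≤ c
  · by_cases h2 : c ≤ 'Z'
    · have hA : 65 ≤ c.toNat := by
        have := (pv_char_le_iff 'A' c).1 h1; simpa using this
      have hZ : c.toNat ≤ 90 := by
        have := (pv_char_le_iff c 'Z').1 h2; simpa using this
      rw [if_pos (by simp [h1, h2])] at h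
      have hval : (Char.ofNat (c.toNat + 32)).toNat = c.toNat + 32 := by
        rw [Char.toNat_ofNat, if_pos]; exact Or.inl (by omega)
      have h3 : ('\n').toNat = c.toNat + 32 := by rw [← h, hval]
      have h4 : ('\n').toNat = 10 := rfl
      omega
    · rw [if_neg (by simp [h2])] at h; exact h
  · rw [if_neg (by simp [h1])] at h; exact h

theorem pv_no_nl_lower (l : List Char) (h : '\n' ∉ l) : '\n' ∉ PySem.Chars.lower l := by
  unfold PySem.Chars.lower
  intro hm
  obtain ⟨c, hc, he⟩ := List.mem_map.1 hm
  exact h (pv_lowerChar_ne_nl c he ▸ hc)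

-- keys of the role table: already lowercased, and free of '\n'
theorem pv_keys_prop (roles : List (String × String)) :
    ∀ p ∈ (pmA_ciRoles roles).items, PySem.Chars.lower p.1 = p.1 ∧ '\n' ∉ p.1 := by
  unfold pmA_ciRoles
  generalize (PySem.Dict.ofList roles).items = L
  have main : ∀ (L : List (String × String)) (d : PySem.Dict (List Char) (String × String)),
      (∀ p ∈ d.items, PySem.Chars.lower p.1 = p.1 ∧ '\n' ∉ p.1) →
      ∀ p ∈ (L.foldl (fun d rp => d.insert (PySem.Chars.lower (pmA_roleName rp.2.toList)) rp) d).items,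
        PySem.Chars.lower p.1 = p.1 ∧ '\n' ∉ p.1 := by
    intro L
    induction L with
    | nil => intro d h; simpa using h
    | cons rp rest ih =>
      intro d h
      simp only [List.foldl_cons]
      apply ih
      intro p hp
      rw [PySem.Dict.mem_items_insert] at hp
      rcases hp with rfl | ⟨hp, _⟩
      · refine ⟨pv_lower_idem _, pv_no_nl_lower _ ?_⟩
        unfold pmA_roleName
        rw [pv_splitOn_eq]
        cases hs : pvSplit1 rp.2.toList with
        | nil => exact absurd hs (pvSplit1_ne_nil _)
        | cons hh tt =>
          show '\n' ∉ (hh :: tt).headD []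
          exact pvSplit1_no_nl rp.2.toList hh (by rw [hs]; simp)
      · exact h p hp
  intro p hp
  exact main L PySem.Dict.empty (by simp [PySem.Dict.empty]) p hp

-- ===== the marker condition at a line start, in terms of the line decomposition =====
def pvShape (rest : List (List Char)) : Bool :=
  match rest with
  | l2 :: _ :: _ => l2 == ['-', '-', '-']
  | _ => false

theorem pv_take4 (r1 T : List Char) (h1 : '\n' ∉ r1) (hT : T = [] ∨ ∃ U, T = '\n' :: U) :
    (r1 ++ T).take 4 = ['-', '-', '-', '\n'] ↔ (r1 = ['-', '-', '-'] ∧ T ≠ []) := by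
  constructor
  · intro h
    rcases hT with rfl | ⟨U, rfl⟩
    · rw [List.append_nil] at h
      have : '\n' ∈ r1.take 4 := by rw [h]; simp
      exact absurd (List.mem_of_mem_take this) h1
    · match r1 with
      | [] => simp at h
      | [a] => simp at h
      | [a, b] => simp at h
      | [a, b, c] =>
        simp at h
        obtain ⟨rfl, rfl, rfl⟩ := h
        exact ⟨rfl, by simp⟩
      | a :: b :: c :: d :: rr =>
        simp at h
        obtain ⟨-, -, -, hd⟩ := h
        exact absurd (hd ▸ (by simp : d ∈ a :: b :: c :: d :: rr)) h1
  · rintro ⟨rfl, hne⟩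
    rcases hT with rfl | ⟨U, rfl⟩
    · exact absurd rfl hne
    · rfl

theorem pv_condB_line (cs ln : List Char) (off : Nat) (rest : List (List Char)) (name : List Char)
    (Hoff : off ≤ cs.length)
    (Hdrop : cs.drop off = ln ++ pvTail rest)
    (Hline : '\n' ∉ ln) (Hname : '\n' ∉ name)
    (Hrest : ∀ p ∈ rest, '\n' ∉ p) :
    pvCondB cs off name = ((name == PySem.Chars.lower ln) && pvShape rest) := by
  apply pv_bool_ext
  rw [pv_condB_iff, Bool.and_eq_true, beq_iff_eq]
  have hXlen : cs.length = off + ln.length + (pvTail rest).length := by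
    have := congrArg List.length Hdrop
    rw [List.length_drop, List.length_append] at this
    omega
  have hd2 : cs.drop (off + name.length) = (ln ++ pvTail rest).drop name.length := by
    rw [← Hdrop, List.drop_drop]
  constructor
  · rintro ⟨h1, h2, h3⟩
    rw [Hdrop] at h2
    rw [hd2] at h3
    have hXlong : name.length + 5 ≤ (ln ++ pvTail rest).length := by
      rw [List.length_append]
      omega
    have hmle : name.length ≤ ln.length := by
      by_contra hgt
      push_neg at hgt
      have hrest_ne : pvTail rest ≠ [] := by
        intro hnil
        rw [List.length_append, hnil] at hXlong
        simp at hXlong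
        omega
      obtain ⟨U, hU⟩ : ∃ U, pvTail rest = '\n' :: U := by
        cases rest with
        | nil => exact absurd rfl hrest_ne
        | cons a t => exact ⟨_, rfl⟩
      have hXat : (ln ++ pvTail rest)[ln.length]? = some '\n' := by
        rw [List.getElem?_append_right (le_refl _)]
        simp [hU]
      have hname : name[ln.length]? = some '\n' := by
        rw [← h2]
        unfold PySem.Chars.lower
        rw [List.getElem?_map]
        rw [List.getElem?_take, if_pos (by omega : ln.length < name.length), hXat]
        decide
      exact absurd (List.mem_of_getElem? hname) Hname
    have hmeq : name.length = ln.length := by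
      by_contra hne2
      have hmlt : name.length < ln.length := by omega
      have h30 : ((ln ++ pvTail rest).drop name.length)[0]? = some '\n' := by
        have h31 := congrArg (fun l => l[0]?) h3
        simp only [List.getElem?_take] at h31
        simpa using h31
      rw [List.getElem?_drop] at h30
      rw [List.getElem?_append_left (by omega)] at h30
      have : ('\n' : Char) ∈ ln := List.mem_of_getElem? (by simpa using h30)
      exact Hline this
    have htake : (ln ++ pvTail rest).take name.length = ln := by
      rw [hmeq, List.take_left]
    have hdropX : (ln ++ pvTail rest).drop name.length = pvTail rest := by
      rw [hmeq, List.drop_left]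
    rw [htake] at h2
    rw [hdropX] at h3
    refine ⟨h2.symm, ?_⟩
    cases rest with
    | nil => simp [pvTail] at h3
    | cons r1 rt =>
      have hT : pvTail (r1 :: rt) = '\n' :: (r1 ++ pvTail rt) := by
        show '\n' :: pvJoins (r1 :: rt) = _
        rw [pvJoins_cons]
      rw [hT] at h3
      rw [show (5 : Nat) = 4 + 1 from rfl, List.take_succ_cons] at h3
      have h4 : (r1 ++ pvTail rt).take 4 = ['-', '-', '-', '\n'] := by
        have := List.cons.injEq '\n' ((r1 ++ pvTail rt).take 4) '\n' ['-', '-', '-', '\n'] ▸ h3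
        simpa using h3
      have hTt : pvTail rt = [] ∨ ∃ U, pvTail rt = '\n' :: U := by
        cases rt with
        | nil => exact Or.inl rfl
        | cons a t => exact Or.inr ⟨_, rfl⟩
      obtain ⟨hr1, hne⟩ := (pv_take4 r1 (pvTail rt) (Hrest r1 (by simp)) hTt).1 h4
      have hrt_ne : rt ≠ [] := by
        intro h0
        rw [h0] at hne
        exact hne rfl
      obtain ⟨r2, t2, rfl⟩ : ∃ r2 t2, rt = r2 :: t2 := by
        cases rt with
        | nil => exact absurd rfl hrt_ne
        | cons a t => exact ⟨a, t, rfl⟩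
      subst hr1
      rfl
  · rintro ⟨hnm, hsh⟩
    obtain ⟨r2, t, rfl⟩ : ∃ r2 t, rest = ['-', '-', '-'] :: r2 :: t := by
      unfold pvShape at hsh
      cases rest with
      | nil => cases hsh
      | cons l2 rt =>
        cases rt with
        | nil => cases hsh
        | cons b t2 =>
          have hl2 : l2 = ['-', '-', '-'] := by simpa using hsh
          exact ⟨b, t2, by rw [hl2]⟩
    have hml : name.length = ln.length := by rw [hnm, pv_lower_length]
    have hT : pvTail (['-', '-', '-'] :: r2 :: t)
        = '\n' :: '-' :: '-' :: '-' :: '\n' :: pvJoins (r2 :: t) := by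
      show '\n' :: pvJoins _ = _
      rw [pvJoins_cons]
      rfl
    refine ⟨?_, ?_, ?_⟩
    · have h5 : (pvTail (['-', '-', '-'] :: r2 :: t)).length = 5 + (pvJoins (r2 :: t)).length := by
        rw [hT]; simp; omega
      omega
    · rw [Hdrop, hml, List.take_left, hnm]
    · rw [hd2, hml, List.drop_left, hT]
      rfl

theorem pv_findAt_line (cs ln : List Char) (off : Nat) (rest : List (List Char))
    (Hoff : off ≤ cs.length)
    (Hdrop : cs.drop off = ln ++ pvTail rest)
    (Hline : '\n' ∉ ln)
    (Hrest : ∀ p ∈ rest, '\n' ∉ p)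
    (items : List (List Char × String)) (Hkeys : ∀ p ∈ items, '\n' ∉ p.1) :
    pvFindAt cs off items
      = if pvShape rest = true then
          (items.find? (fun p => p.1 == PySem.Chars.lower ln)).map
            (fun p => (off, p.2, off + ln.length + 5))
        else none := by
  induction items with
  | nil => cases hsh : pvShape rest <;> simp [pvFindAt, hsh]
  | cons kr its ih =>
    obtain ⟨name, role⟩ := kr
    rw [pv_findAt_cons,
      pv_condB_line cs ln off rest name Hoff Hdrop Hline (Hkeys (name, role) (by simp)) Hrest]
    have ih' := ih (fun p hp => Hkeys p (by simp [hp]))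
    by_cases hsh : pvShape rest = true
    · rw [if_pos hsh] at ih' ⊢
      rw [List.find?_cons]
      by_cases hn : (name == PySem.Chars.lower ln) = true
      · rw [hn]
        have hlen : name.length = ln.length := by
          rw [(beq_iff_eq.1 hn), pv_lower_length]
        simp only [hsh, Bool.and_true, if_pos rfl]
        rw [hlen]
        rfl
      · rw [if_neg (by simp [hn, hsh])]
        simp only [Bool.not_eq_true] at hn
        rw [hn, ih']
    · rw [if_neg hsh] at ih' ⊢
      rw [if_neg (by simp [hsh])]
      exact ih'

theorem pv_LS_false_in_line (cs ln tail : List Char) (off q : Nat)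
    (Hdrop : cs.drop off = ln ++ tail) (Hline : '\n' ∉ ln)
    (h1 : off < q) (h2 : q ≤ off + ln.length) :
    pvLS cs q = false := by
  unfold pvLS
  have hj : q - 1 - off < ln.length := by omega
  have hg : cs[q - 1]? = ln[q - 1 - off]? := by
    have e1 : q - 1 = off + (q - 1 - off) := by omega
    rw [e1, ← List.getElem?_drop, Hdrop, List.getElem?_append_left (by omega)]
    congr 1
    omega
  have hq0 : (q == 0) = false := by simp; omega
  rw [hq0, Bool.false_or, pv_pyGet_pred cs q (by omega)]
  cases hc : cs[q - 1]? with
  | none => rfl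
  | some ch =>
    have hchmem : ch ∈ ln := by
      rw [hg] at hc
      exact List.mem_of_getElem? hc
    have hchne : ch ≠ '\n' := fun hh => Hline (hh ▸ hchmem)
    simp [hchne]

theorem pv_scan_head (cs : List Char) (items : List (List Char × String)) :
    ∀ (fuel pos p : Nat) (r : String) (c : Nat) (ms : List (Nat × String × Nat)),
      pvScan cs items fuel pos = (p, r, c) :: ms →
      pos ≤ p ∧ pvMarkAt cs items p = some (p, r, c) := by
  intro fuel
  induction fuel with
  | zero =>
    intro pos p r c ms h
    simp [pvScan] at h
  | succ f ih =>
    intro pos p r c ms h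
    by_cases hp : pos < cs.length
    · rw [pv_scan_succ cs items f pos hp] at h
      cases hm : pvMarkAt cs items pos with
      | none =>
        rw [hm] at h
        obtain ⟨hle, hmk⟩ := ih (pos + 1) p r c ms h
        exact ⟨by omega, hmk⟩
      | some m =>
        obtain ⟨p0, r0, c0⟩ := m
        rw [hm] at h
        have hfacts := pv_markAt_facts cs items pos _ hm
        simp only at hfacts
        injection h with h1 h2
        injection h1 with ha hb
        injection hb with hb1 hb2
        subst ha
        subst hb1
        subst hb2
        rw [hfacts.1] at hm
        exact ⟨le_refl _, hm⟩
    · rw [pv_scan_stop cs items (f + 1) pos hp] at h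
      cases h

theorem pv_collect_cons (tbl : PySem.Dict (List Char) String) (ln : List Char)
    (rest : List (List Char)) (off allowed : Nat) :
    pmB_collect tbl (ln :: rest) off allowed
      = match tbl.get? (PySem.Chars.lower ln) with
        | some role =>
          if allowed ≤ off ∧ pvShape rest = true then
            (off, role, off + ln.length + 5) ::
              pmB_collect tbl rest (off + ln.length + 1) (off + ln.length + 5)
          else pmB_collect tbl rest (off + ln.length + 1) allowed
        | none => pmB_collect tbl rest (off + ln.length + 1) allowed := by
  cases hg : tbl.get? (PySem.Chars.lower ln) with
  | none =>
    cases rest with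
    | nil => simp [pmB_collect, hg]
    | cons a t => cases t <;> simp [pmB_collect, hg]
  | some role =>
    simp only [pmB_collect, hg]
    cases rest with
    | nil => simp [pvShape]
    | cons l2 t =>
      cases t with
      | nil => simp [pvShape]
      | cons b t2 =>
        simp only [pvShape]
        by_cases h2 : l2 = ['-', '-', '-']
        · subst h2
          simp
        · simp [h2]

theorem pv_bridge (cs : List Char) (tbl : PySem.Dict (List Char) String)
    (Hkeys : ∀ p ∈ tbl.items, '\n' ∉ p.1) :
    ∀ (L : List (List Char)) (off allowed fuel : Nat),
      cs.drop off = pvJoins L →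
      (∀ l ∈ L, '\n' ∉ l) →
      off ≤ cs.length →
      pvLS cs off = true →
      (allowed ≤ off ∨ (∃ L', L = ['-', '-', '-'] :: L' ∧ allowed = off + 4)) →
      cs.length < fuel + off →
      pmB_collect tbl L off allowed = pvScan cs tbl.items fuel (max off allowed) := by
  intro L
  induction L with
  | nil =>
    intro off allowed fuel h1 _h2 hoff _hls hinv hfuel
    have hlen : cs.length ≤ off := by
      have hl := congrArg List.length h1
      rw [List.length_drop] at hl
      simp [pvJoins] at hl
      omega
    rcases hinv with hle | ⟨L', hL, _⟩
    · rw [Nat.max_eq_left hle, pv_scan_stop cs _ fuel off (by omega)]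
      rfl
    · cases hL
  | cons ln rest ih =>
    intro off allowed fuel h1 h2 hoff hls hinv hfuel
    rw [pvJoins_cons] at h1
    have hlenX : cs.length = off + ln.length + (pvTail rest).length := by
      have hl := congrArg List.length h1
      rw [List.length_drop, List.length_append] at hl
      omega
    have hlnl : '\n' ∉ ln := h2 ln (by simp)
    have hrestnl : ∀ p ∈ rest, '\n' ∉ p := fun p hp => h2 p (by simp [hp])
    have hdropTail : ∀ T : List Char, cs.drop off = ln ++ ('\n' :: T) →
        cs.drop (off + ln.length + 1) = T := by
      intro T hT0
      have e : (cs.drop off).drop (ln.length + 1) = cs.drop (off + ln.length + 1) := by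
        rw [List.drop_drop]
        congr 1
      
      rw [← e, hT0, show ln ++ '\n' :: T = (ln ++ ['\n']) ++ T by simp]
      exact List.drop_left' (by simp)
    have hlsTail : ∀ T : List Char, cs.drop off = ln ++ ('\n' :: T) →
        pvLS cs (off + ln.length + 1) = true := by
      intro T hT0
      unfold pvLS
      rw [pv_pyGet_pred cs (off + ln.length + 1) (by omega)]
      have hnl : cs[off + ln.length]? = some '\n' := by
        have e := congrArg (fun l => l[ln.length]?) hT0
        simp only at e
        rw [List.getElem?_drop] at e
        rw [e, List.getElem?_append_right (le_refl _)]
        simp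
      rw [show off + ln.length + 1 - 1 = off + ln.length by omega, hnl]
      simp
    rcases hinv with hle | ⟨L', hL, hal⟩
    · -- allowed ≤ off : the scan position is off
      rw [Nat.max_eq_left hle]
      have hfa := pv_findAt_line cs ln off rest hoff h1 hlnl hrestnl tbl.items Hkeys
      have hget : tbl.get? (PySem.Chars.lower ln)
          = (tbl.items.find? (fun p => p.1 == PySem.Chars.lower ln)).map (fun p => p.2) := rfl
      by_cases hcase : pvShape rest = true
          ∧ (tbl.items.find? (fun p => p.1 == PySem.Chars.lower ln)).isSome = true
      · -- a marker begins at off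
        obtain ⟨hsh, hfs⟩ := hcase
        obtain ⟨pkr, hfind⟩ := Option.isSome_iff_exists.1 hfs
        obtain ⟨r2, t, rfl⟩ : ∃ r2 t, rest = ['-', '-', '-'] :: r2 :: t := by
          unfold pvShape at hsh
          cases rest with
          | nil => cases hsh
          | cons l2 rt =>
            cases rt with
            | nil => cases hsh
            | cons b t2 =>
              have hl2 : l2 = ['-', '-', '-'] := by simpa using hsh
              exact ⟨b, t2, by rw [hl2]⟩
        have hT : pvTail (['-', '-', '-'] :: r2 :: t)
            = '\n' :: '-' :: '-' :: '-' :: '\n' :: pvJoins (r2 :: t) := by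
          show '\n' :: pvJoins _ = _
          rw [pvJoins_cons]
          rfl
        have hTlen : 5 ≤ (pvTail (['-', '-', '-'] :: r2 :: t)).length := by
          rw [hT]
          simp
        have hofflt : off < cs.length := by omega
        have hmark : pvMarkAt cs tbl.items off = some (off, pkr.2, off + ln.length + 5) := by
          rw [pv_markAt_eq, if_pos hls, hfa, if_pos hsh, hfind]
          rfl
        obtain ⟨f, rfl⟩ : ∃ f, fuel = f + 1 := ⟨fuel - 1, by omega⟩
        rw [pv_scan_succ cs tbl.items f off hofflt, hmark]
        rw [pv_collect_cons, hget, hfind]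
        simp only [Option.map_some]
        rw [if_pos ⟨hle, hsh⟩]
        have hdrop' : cs.drop (off + ln.length + 1) = pvJoins (['-', '-', '-'] :: r2 :: t) :=
          hdropTail (pvJoins (['-', '-', '-'] :: r2 :: t)) h1
        have hls' : pvLS cs (off + ln.length + 1) = true :=
          hlsTail (pvJoins (['-', '-', '-'] :: r2 :: t)) h1
        have happ := ih (off + ln.length + 1) (off + ln.length + 5) f hdrop' hrestnl
          (by omega) hls' (Or.inr ⟨r2 :: t, rfl, by omega⟩) (by omega)
        rw [happ, Nat.max_eq_right (by omega)]
      · -- no marker at off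
        have hmark : pvMarkAt cs tbl.items off = none := by
          rw [pv_markAt_eq, if_pos hls, hfa]
          by_cases hsh : pvShape rest = true
          · rw [if_pos hsh]
            cases hfind : tbl.items.find? (fun p => p.1 == PySem.Chars.lower ln) with
            | none => rfl
            | some pkr => exact absurd ⟨hsh, by rw [hfind]; rfl⟩ hcase
          · rw [if_neg hsh]
        have hcoll : pmB_collect tbl (ln :: rest) off allowed
            = pmB_collect tbl rest (off + ln.length + 1) allowed := by
          rw [pv_collect_cons, hget]
          cases hfind : tbl.items.find? (fun p => p.1 == PySem.Chars.lower ln) with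
          | none => rfl
          | some pkr =>
            simp only [Option.map_some]
            rw [if_neg (by rintro ⟨-, hsh⟩; exact hcase ⟨hsh, by rw [hfind]; rfl⟩)]
        have hPfalse : ∀ q, off ≤ q → q ≤ off + ln.length → pvP cs tbl.items q = false := by
          intro q hq1 hq2
          unfold pvP
          rcases Nat.eq_or_lt_of_le hq1 with rfl | hlt2
          · rw [hmark]
            rfl
          · rw [pv_markAt_eq,
              if_neg (by simp [pv_LS_false_in_line cs ln (pvTail rest) off q h1 hlnl hlt2 hq2])]
            rfl
        rw [hcoll]
        cases rest with
        | nil =>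
          have hlen0 : cs.length = off + ln.length := by
            simpa [pvTail] using hlenX
          rw [show pmB_collect tbl [] (off + ln.length + 1) allowed = [] from rfl]
          rw [pv_scan_skip cs tbl.items (cs.length - off) off cs.length fuel fuel
            (le_refl _) (by omega) (le_refl _)
            (fun q hq1 hq2 => hPfalse q hq1 (by omega)) (by omega) (by omega)]
          exact (pv_scan_stop cs tbl.items fuel cs.length (by omega)).symm
        | cons r1 rt =>
          have hT1 : 1 ≤ (pvTail (r1 :: rt)).length := by
            show 1 ≤ ('\n' :: pvJoins (r1 :: rt)).length
            simp
          have hdrop' : cs.drop (off + ln.length + 1) = pvJoins (r1 :: rt) :=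
            hdropTail (pvJoins (r1 :: rt)) h1
          have hls' : pvLS cs (off + ln.length + 1) = true :=
            hlsTail (pvJoins (r1 :: rt)) h1
          have happ := ih (off + ln.length + 1) allowed fuel hdrop' hrestnl
            (by omega) hls' (Or.inl (by omega)) (by omega)
          rw [happ, Nat.max_eq_left (by omega)]
          exact (pv_scan_skip cs tbl.items (ln.length + 1) off (off + ln.length + 1) fuel fuel
            (by omega) (by omega) (by omega)
            (fun q hq1 hq2 => hPfalse q hq1 (by omega)) (by omega) (by omega)).symm
    · -- the previous marker reached into this line: skip it
      injection hL with hln hrest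
      subst hln
      subst hrest
      subst hal
      rw [Nat.max_eq_right (by omega)]
      have hcoll : pmB_collect tbl (['-', '-', '-'] :: rest) off (off + 4)
          = pmB_collect tbl rest (off + 4) (off + 4) := by
        rw [pv_collect_cons]
        cases hg : tbl.get? (PySem.Chars.lower ['-', '-', '-']) with
        | none =>
          dsimp only
          norm_num
        | some role =>
          dsimp only
          rw [if_neg (by rintro ⟨hc, -⟩; omega)]
          norm_num
      rw [hcoll]
      cases rest with
      | nil =>
        have hlen0 : cs.length = off + 3 := by
          simpa [pvTail] using hlenX
        rw [show pmB_collect tbl [] (off + 4) (off + 4) = [] from rfl]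
        exact (pv_scan_stop cs tbl.items fuel (off + 4) (by omega)).symm
      | cons r1 rt =>
        have hT1 : 1 ≤ (pvTail (r1 :: rt)).length := by
          show 1 ≤ ('\n' :: pvJoins (r1 :: rt)).length
          simp
        have hdrop' : cs.drop (off + 4) = pvJoins (r1 :: rt) := by
          have := hdropTail (pvJoins (r1 :: rt)) h1
          simpa using this
        have hls' : pvLS cs (off + 4) = true := by
          have := hlsTail (pvJoins (r1 :: rt)) h1
          simpa using this
        have happ := ih (off + 4) (off + 4) fuel hdrop' hrestnl
          (by simp at hlenX; omega) hls' (Or.inl (le_refl _)) (by omega)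
        rw [happ, Nat.max_eq_left (le_refl _)]

theorem pv_toplevel (content : String) (roles : List (String × String)) :
    parse_messages_py content roles = parse_messages_py_alt content roles := by
  unfold parse_messages_py parse_messages_py_alt
  by_cases hz : ((PySem.Dict.ofList roles).items == ([] : List (String × String))) = true
  · rw [if_pos hz, if_pos hz]
  · rw [if_neg hz, if_neg hz]
    by_cases hcnil : content.toList = ([] : List Char)
    · rw [if_pos (by simp [hcnil])]
      rw [pv_loop_stop content content.toList _ _ 0 (by simp [hcnil])]
    · rw [if_neg (by simp [hcnil])]
      have hk : ∀ p ∈ (pmA_ciRoles roles).items, PySem.Chars.lower p.1 = p.1 :=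
        fun p hp => (pv_keys_prop roles p hp).1
      have hknlB : ∀ p ∈ (pmB_table roles).items, '\n' ∉ p.1 := by
        rw [pv_table_items]
        intro p hp
        obtain ⟨q, hq, rfl⟩ := List.mem_map.1 hp
        exact (pv_keys_prop roles q hq).2
      have hlen0 : 0 < content.toList.length := by
        cases hcl : content.toList with
        | nil => exact absurd hcl hcnil
        | cons a l => simp
      have hjoin : content.toList.drop 0 = pvJoins (pvSplit1 content.toList) := by
        rw [List.drop_zero, pvJoins_split1]
      have hbridge := pv_bridge content.toList (pmB_table roles) hknlB
        (pvSplit1 content.toList) 0 0 (content.toList.length + 1)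
        hjoin (pvSplit1_no_nl content.toList) (by omega) (by unfold pvLS; simp)
        (Or.inl (le_refl 0)) (by omega)
      rw [Nat.max_self] at hbridge
      rw [pv_splitOn_eq, hbridge, pv_table_items roles]
      set cs := content.toList with hcs
      set itemsA := (pmA_ciRoles roles).items with hIA
      set items := itemsA.map (fun p => (p.1, p.2.1)) with hitems
      cases hscan : pvScan cs items (cs.length + 1) 0 with
      | nil =>
        have hm0 : pvMarkAt cs items 0 = none := by
          cases hm : pvMarkAt cs items 0 with
          | none => rfl
          | some m0 =>
            obtain ⟨q0, r0, c0⟩ := m0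
            rw [pv_scan_succ cs items cs.length 0 hlen0, hm] at hscan
            cases hscan
        have hA : pmA_loop content cs itemsA (cs.length + 1) 0
            = [[("role", "system"), ("content", PySem.Str.strip content)]] := by
          rw [pv_loop_succ content cs itemsA cs.length 0 hlen0 (by unfold pvLS; simp)]
          rw [pv_headMatch_eq cs 0 itemsA hk]
          rw [show pvFindAt cs 0 items = pvMarkAt cs items 0 from by
            rw [pv_markAt_eq, if_pos (by unfold pvLS; simp)], hm0]
          rfl
        rw [hA]
      | cons m ms =>
        obtain ⟨p, r, c⟩ := m
        obtain ⟨hple, hmp⟩ := pv_scan_head cs items (cs.length + 1) 0 p r c ms hscan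
        by_cases hp0 : p = 0
        · subst hp0
          have hP : pvP cs items 0 = true := by
            unfold pvP
            rw [hmp]
            rfl
          have hmain := pv_main content cs itemsA hk cs.length 0 (cs.length + 1) (cs.length + 1)
            (by omega) (by omega) hP (by omega) (by omega)
          rw [hscan] at hmain
          rw [hmain]
          simp
        · have hm0 : pvMarkAt cs items 0 = none := by
            cases hm : pvMarkAt cs items 0 with
            | none => rfl
            | some m0 =>
              obtain ⟨q0, r0, c0⟩ := m0
              have hf0 := pv_markAt_facts cs items 0 _ hm
              simp only at hf0
              rw [pv_scan_succ cs items cs.length 0 hlen0, hm] at hscan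
              rw [hf0.1] at hscan
              injection hscan with h1 h2
              injection h1 with ha hb
              exact absurd ha.symm hp0
          have hA : pmA_loop content cs itemsA (cs.length + 1) 0
              = [[("role", "system"), ("content", PySem.Str.strip content)]] := by
            rw [pv_loop_succ content cs itemsA cs.length 0 hlen0 (by unfold pvLS; simp)]
            rw [pv_headMatch_eq cs 0 itemsA hk]
            rw [show pvFindAt cs 0 items = pvMarkAt cs items 0 from by
              rw [pv_markAt_eq, if_pos (by unfold pvLS; simp)], hm0]
            rfl
          rw [hA]
          dsimp only
          rw [if_pos hp0]

-- ===== VERDICT (by name: the statement is the Claim_ definition above) =====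
theorem parse_messages_py_spec : Claim_equal_parse_messages_py := by
  intro content roles _
  unfold Spec_parse_messages_py
  exact pv_toplevel content roles
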